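-- pv_equiv track=rewrite | github.com/nanotech-empa/aiida-nanotech-empa | aiida_nanotech_empa/workflows/cp2k/cp2k_utils.py | get_planes
-- ===== SOURCE A (Python) =====
-- import numbers
--
-- def is_number(s):
--     """Returns True if string is a number or a range."""
--     num = s.split("..")
--     try:
--         return all(isinstance(float(f), numbers.Number) for f in num)
--     except ValueError:
--         return False
--
-- def get_ids(details, label=None):
--     """Get ids of atoms points and planes in string definitions of CP2K CVs."""
--     if label:
--         labels = [i for i, x in enumerate(details) if x.lower() == label]
--         ids = []
--         for lab in labels:
--             ids0 = ""
--             pos = lab + 2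
--             while is_number(details[pos]):
--                 ids0 += details[pos] + " "
--                 pos += 1
--             ids.append(ids0)
--     else:
--         labels = []
--         ids = []
--         pos = 1
--         while is_number(details[pos]):
--             ids.append(details[pos])
--             pos += 1
--     return labels, ids
--
-- def get_planes(details):
--     """Returns CP2K input dictionary section for the planes of a  CV."""
--     planes, allids = get_ids(details, "plane")
--     allplanes = []
--     for i, plane in enumerate(planes):
--         ids = allids[i]
--         if details[plane + 1].lower() == "atoms":
--             allplanes.append({"DEF_TYPE": "ATOMS", "ATOMS": ids})
--         else:
--             allplanes.append({"DEF_TYPE": "VECTOR", "NORMAL_VECTOR": ids})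
--
--     return {"PLANE": allplanes}
-- ===== SOURCE B (Python) =====
-- import numbers
--
--
-- def is_number(s):
--     """Returns True if string is a number or a range."""
--     num = s.split("..")
--     try:
--         return all(isinstance(float(f), numbers.Number) for f in num)
--     except ValueError:
--         return False
--
--
-- def get_planes(details):
--     """Returns CP2K input dictionary section for the planes of a  CV."""
--     n = len(details)
--     # One backward pass precomputes, for every position i, the space-terminated
--     # join of the maximal run of number tokens starting at i; each plane then
--     # just looks its ids up instead of re-scanning forward.
--     runs = [""] * (n + 1)
--     for i in range(n - 1, -1, -1):
--         if is_number(details[i]):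
--             runs[i] = details[i] + " " + runs[i + 1]
--     return {"PLANE": [
--         {"DEF_TYPE": "ATOMS", "ATOMS": runs[i + 2]}
--         if details[i + 1].lower() == "atoms"
--         else {"DEF_TYPE": "VECTOR", "NORMAL_VECTOR": runs[i + 2]}
--         for i, tok in enumerate(details)
--         if tok.lower() == "plane"
--     ]}
-- ===== Notes on version B (the rewrite author's own statement) =====
-- stated objective: alternative
-- what changed: Replaced get_ids's per-plane forward while-scans by one backward suffix pass that precomputes runs[i] (the joined number-token run starting at i) for every position, after which each plane is emitted by a comprehension doing two O(1) lookups.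
-- crash fix: On inputs where the number-token run after some 'plane' label reaches the end of the list (and no 'plane' sits at the last position) A raises IndexError scanning past the end; B's precomputed suffix table ends at the list end, so B returns the parsed planes. — e.g. on get_planes(["plane", "atoms", "1"]): A raises IndexError, B returns [("PLANE", [[("DEF_TYPE", "ATOMS"), ("ATOMS", "1 ")]])]
import Mathlib
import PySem

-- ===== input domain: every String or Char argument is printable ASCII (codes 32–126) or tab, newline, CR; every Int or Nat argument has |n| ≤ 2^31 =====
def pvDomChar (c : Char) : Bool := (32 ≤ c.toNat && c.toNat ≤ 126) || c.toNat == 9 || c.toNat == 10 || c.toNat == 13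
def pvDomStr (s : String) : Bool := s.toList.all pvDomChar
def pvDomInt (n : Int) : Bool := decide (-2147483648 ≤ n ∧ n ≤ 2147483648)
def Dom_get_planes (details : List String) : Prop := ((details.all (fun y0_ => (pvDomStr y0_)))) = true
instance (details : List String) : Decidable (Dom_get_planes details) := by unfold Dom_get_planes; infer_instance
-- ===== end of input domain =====

-- B replaces get_ids's per-plane forward scans by one backward suffix pass precomputing the
-- number-token run string at every position, then emits each plane with two O(1) lookups.

-- ===== SHARED HELPER (is_number is textually identical in A and in B) =====

-- Acceptance predicate of Python's float(str) on the ASCII domain, hand-ported step for step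
-- (PySem has no float parser; only VALIDITY is needed, never a float value).
-- Exact on printable ASCII + tab/newline/CR; checked against CPython on 400k fuzzed strings.
-- every '_' must sit between two digits (the getD default ' ' is not a digit, so an
-- underscore at either end fails)
def floatUnderscoreOK (cs : List Char) : Bool :=
  (List.range cs.length).all (fun k =>
    cs.getD k ' ' != '_' ||
      (decide (1 ≤ k) && PySem.Chars.isdigit (cs.getD (k - 1) ' ') &&
        PySem.Chars.isdigit (cs.getD (k + 1) ' ')))

def floatDropSign : List Char → List Char
  | c :: rest => if c == '+' || c == '-' then rest else c :: rest
  | [] => []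

-- split at the first 'e'/'E' (mantissa, optional exponent part)
def floatSplitExp (cs : List Char) : List Char × Option (List Char) :=
  let m := cs.takeWhile (fun c => !(c == 'e' || c == 'E'))
  match cs.dropWhile (fun c => !(c == 'e' || c == 'E')) with
  | [] => (m, none)
  | _ :: rest => (m, some rest)

def floatMantOK (m : List Char) : Bool :=
  m.all (fun c => PySem.Chars.isdigit c || c == '.') && m.count '.' ≤ 1 && m.any PySem.Chars.isdigit

def floatExpOK (e : List Char) : Bool :=
  let e' := floatDropSign e
  e' != [] && e'.all PySem.Chars.isdigit

def floatValid (cs : List Char) : Bool :=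
  let t := PySem.Chars.strip cs
  match t with
  | [] => false
  | _ =>
    let u := floatDropSign t
    let ul := PySem.Chars.lower u
    if ul = "inf".toList || ul = "infinity".toList || ul = "nan".toList then true
    else if floatUnderscoreOK u then
      let v := u.filter (fun c => c != '_')
      match floatSplitExp v with
      | (m, none) => floatMantOK m
      | (m, some e) => floatMantOK m && floatExpOK e
    else false

def is_number (s : String) : Bool :=
  -- num = s.split(".."); all(float(f) parses for f in num)
  (PySem.Chars.splitOn s.toList "..".toList).all floatValid

-- ===== PORT A =====

-- the 'while is_number(details[pos]): ids0 += details[pos] + " "; pos += 1' loop of get_ids;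
-- at an out-of-range pos Python raises IndexError (excluded by Pre_), the total port stops.
def scanA (details : List String) (pos : Nat) (acc : String) : String :=
  match h : details[pos]? with
  | some s => if is_number s then scanA details (pos + 1) (acc ++ (s ++ " ")) else acc
  | none => acc
termination_by details.length - pos
decreasing_by
  have : pos < details.length := (List.getElem?_eq_some_iff.mp h).1
  omega

-- the label-None 'while is_number(details[pos]): ids.append(details[pos])' loop of get_ids (same total form)
def scanNoneA (details : List String) (pos : Nat) (acc : List String) : List String :=
  match h : details[pos]? with
  | some s => if is_number s then scanNoneA details (pos + 1) (acc ++ [s]) else acc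
  | none => acc
termination_by details.length - pos
decreasing_by
  have : pos < details.length := (List.getElem?_eq_some_iff.mp h).1
  omega

-- get_ids(details, label): label is Option String (None → else branch; get_planes always passes "plane", a non-empty string, so Python's `if label:` truthiness coincides with the Option match)
def get_ids (details : List String) (label : Option String) : List Int × List String :=
  match label with
  | some lab =>
      let labels := ((PySem.List.enumerate details).filter (fun p => PySem.Str.lower p.2 == lab)).map (·.1)
      let ids := labels.map (fun l => scanA details (l + 2).toNat "")
      (labels, ids)
  | none => ([], scanNoneA details 1 [])

def get_planes (details : List String) : List (String × List (List (String × String))) :=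
  let pr := get_ids details (some "plane")
  let planes := pr.1
  let allids := pr.2
  let allplanes := (PySem.List.enumerate planes).foldl (fun acc pi =>
      let ids := PySem.List.pyGetD allids pi.1 ""
      if PySem.Str.lower (PySem.List.pyGetD details (pi.2 + 1) "") == "atoms" then
        acc ++ [[("DEF_TYPE", "ATOMS"), ("ATOMS", ids)]]
      else
        acc ++ [[("DEF_TYPE", "VECTOR"), ("NORMAL_VECTOR", ids)]]) []
  [("PLANE", allplanes)]

-- ===== PORT B =====

-- the backward 'for i in range(n-1,-1,-1)' pass: runs[i] = details[i] + " " + runs[i+1] if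
-- is_number(details[i]) else "" (the array cell keeps its initial ""), built back-to-front;
-- the result has length n+1 with runs[n] = "".
def runsOf (details : List String) : List String :=
  details.foldr
    (fun t acc => (if is_number t then t ++ " " ++ acc.headD "" else "") :: acc) [""]

def get_planes_alt (details : List String) : List (String × List (List (String × String))) :=
  let runs := runsOf details
  -- the comprehension: filter the enumerated tokens, map each plane to its dict
  let allplanes :=
    ((PySem.List.enumerate details).filter (fun p => PySem.Str.lower p.2 == "plane")).map
      (fun p =>
        if PySem.Str.lower (PySem.List.pyGetD details (p.1 + 1) "") == "atoms" then
          [("DEF_TYPE", "ATOMS"), ("ATOMS", PySem.List.pyGetD runs (p.1 + 2) "")]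
        else
          [("DEF_TYPE", "VECTOR"), ("NORMAL_VECTOR", PySem.List.pyGetD runs (p.1 + 2) "")])
  [("PLANE", allplanes)]

-- ===== PRECONDITION & SPEC =====

-- A raises IndexError when the number-token scan that starts two tokens after a "plane" label
-- runs past the end of the list; Pre_ requires a non-number token to stop each scan.
def Pre_get_planes (details : List String) : Prop :=
  ∀ i < details.length, PySem.Str.lower (details.getD i "") = "plane" →
    ∃ j < details.length, i + 2 ≤ j ∧ is_number (details.getD j "") = false

instance (details : List String) : Decidable (Pre_get_planes details) := by
  unfold Pre_get_planes; infer_instance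

def pvWitness_get_planes : List String := ["plane", "atoms", "1", "end"]

-- On inputs where some plane's number run reaches the end of the list (and no "plane" label sits at
-- the last position), A raises IndexError while B's suffix table ends at the list end and B returns.
def Raises_get_planes (details : List String) : Prop :=
  (∃ i < details.length, PySem.Str.lower (details.getD i "") = "plane" ∧
      ∀ j < details.length, i + 2 ≤ j → is_number (details.getD j "") = true)
  ∧ PySem.Str.lower (details.getD (details.length - 1) "") ≠ "plane"

instance (details : List String) : Decidable (Raises_get_planes details) := by
  unfold Raises_get_planes; infer_instance

def pvRaiseWitness_get_planes : List String := ["plane", "atoms", "1"]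

def pvRaiseWitnessOut_get_planes : List (String × List (List (String × String))) :=
  [("PLANE", [[("DEF_TYPE", "ATOMS"), ("ATOMS", "1 ")]])]

def Spec_get_planes (details : List String) (out : List (String × List (List (String × String)))) : Prop := out = get_planes_alt details
instance (details : List String) (out : List (String × List (List (String × String)))) : Decidable (Spec_get_planes details out) := by unfold Spec_get_planes; infer_instance

-- ===== CLAIM (what is proved, stated in full; the proofs are below) =====
def Claim_equal_get_planes : Prop := ∀ (details : List String), Dom_get_planes details → Pre_get_planes details → Spec_get_planes details (get_planes details)

def Claim_raises_get_planes : Prop := (∀ (details : List String), Dom_get_planes details → Raises_get_planes details → ¬ Pre_get_planes details) ∧ (Dom_get_planes (pvRaiseWitness_get_planes) ∧ Raises_get_planes (pvRaiseWitness_get_planes) ∧ get_planes_alt (pvRaiseWitness_get_planes) = pvRaiseWitnessOut_get_planes)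

-- ===== LEMMAS AND PROOFS =====

-- the id string of the maximal number-token run starting at position pos
def idsOf (details : List String) (pos : Nat) : String :=
  PySem.Str.join "" (((details.drop pos).takeWhile is_number).map (fun t => t ++ " "))

theorem str_join_empty_nil : PySem.Str.join "" ([] : List String) = "" := by
  rw [← String.toList_inj]
  simp [PySem.Str.toList_join, PySem.Chars.join_nil]

theorem str_join_empty_cons (x : String) (l : List String) :
    PySem.Str.join "" (x :: l) = x ++ PySem.Str.join "" l := by
  rw [← String.toList_inj]
  cases l with
  | nil => simp [PySem.Str.toList_join, PySem.Chars.join_singleton, PySem.Chars.join_nil]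
  | cons y t => simp [PySem.Str.toList_join, PySem.Chars.join_cons_cons]

theorem scanA_eq (details : List String) (pos : Nat) (acc : String) :
    scanA details pos acc = acc ++ idsOf details pos := by
  generalize hn : details.length - pos = n
  induction n generalizing pos acc with
  | zero =>
    have hge : details.length ≤ pos := by omega
    rw [scanA.eq_def]
    split
    next s h => exact absurd h (by simp [List.getElem?_eq_none hge])
    next h => simp [idsOf, List.drop_of_length_le hge, str_join_empty_nil]
  | succ n ih =>
    rw [scanA.eq_def]
    split
    next s h =>
      obtain ⟨hlt, hget⟩ := List.getElem?_eq_some_iff.mp h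
      have hdrop : details.drop pos = s :: details.drop (pos + 1) := by
        rw [← hget]; exact (List.getElem_cons_drop hlt).symm
      by_cases hnum : is_number s
      · rw [if_pos hnum, ih (pos + 1) _ (by omega)]
        simp only [idsOf, hdrop, List.takeWhile_cons, hnum, if_pos, List.map_cons,
          str_join_empty_cons]
        rw [String.append_assoc]
      · rw [if_neg hnum]
        simp [idsOf, hdrop, hnum, str_join_empty_nil]
    next h =>
      have hge : details.length ≤ pos := List.getElem?_eq_none_iff.mp h
      simp [idsOf, List.drop_of_length_le hge, str_join_empty_nil]

-- the suffix table agrees with idsOf at EVERY Nat index (past the table both give "")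
theorem runsOf_getD (details : List String) (m : Nat) :
    (runsOf details).getD m "" = idsOf details m := by
  induction details generalizing m with
  | nil =>
    cases m with
    | zero => simp [runsOf, idsOf, str_join_empty_nil]
    | succ m => simp [runsOf, idsOf, str_join_empty_nil]
  | cons d ds ih =>
    have hunfold : runsOf (d :: ds)
        = (if is_number d then d ++ " " ++ (runsOf ds).headD "" else "") :: runsOf ds := rfl
    cases m with
    | zero =>
      have hhead : (runsOf ds).headD "" = (runsOf ds).getD 0 "" := by
        cases h : runsOf ds with
        | nil => simp
        | cons a t => simp
      rw [hunfold]
      by_cases hnum : is_number d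
      · simp only [List.getD_cons_zero, hnum, if_pos, hhead, ih 0]
        simp [idsOf, hnum, str_join_empty_cons, String.append_assoc]
      · simp [idsOf, hnum, str_join_empty_nil]
    | succ m =>
      rw [hunfold]
      simp only [List.getD_cons_succ, ih m]
      simp [idsOf]

-- A's fold is a map of dP over the enumerated filtered labels
theorem foldlA_eq (details allids : List String) (l : List (Int × Int))
    (init : List (List (String × String))) :
    l.foldl (fun acc pi =>
      if PySem.Str.lower (PySem.List.pyGetD details (pi.2 + 1) "") == "atoms" then
        acc ++ [[("DEF_TYPE", "ATOMS"), ("ATOMS", PySem.List.pyGetD allids pi.1 "")]]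
      else
        acc ++ [[("DEF_TYPE", "VECTOR"), ("NORMAL_VECTOR", PySem.List.pyGetD allids pi.1 "")]]) init
      = init ++ l.map (fun pi =>
          if PySem.Str.lower (PySem.List.pyGetD details (pi.2 + 1) "") == "atoms" then
            [("DEF_TYPE", "ATOMS"), ("ATOMS", PySem.List.pyGetD allids pi.1 "")]
          else
            [("DEF_TYPE", "VECTOR"), ("NORMAL_VECTOR", PySem.List.pyGetD allids pi.1 "")]) := by
  have h1 : (fun (acc : List (List (String × String))) (pi : Int × Int) =>
      if PySem.Str.lower (PySem.List.pyGetD details (pi.2 + 1) "") == "atoms" then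
        acc ++ [[("DEF_TYPE", "ATOMS"), ("ATOMS", PySem.List.pyGetD allids pi.1 "")]]
      else
        acc ++ [[("DEF_TYPE", "VECTOR"), ("NORMAL_VECTOR", PySem.List.pyGetD allids pi.1 "")]])
      = fun acc pi => acc ++ [if PySem.Str.lower (PySem.List.pyGetD details (pi.2 + 1) "") == "atoms" then
            [("DEF_TYPE", "ATOMS"), ("ATOMS", PySem.List.pyGetD allids pi.1 "")]
          else
            [("DEF_TYPE", "VECTOR"), ("NORMAL_VECTOR", PySem.List.pyGetD allids pi.1 "")]] := by
    funext acc pi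
    by_cases hc : PySem.Str.lower (PySem.List.pyGetD details (pi.2 + 1) "") == "atoms" <;>
      simp [hc]
  rw [h1, PySem.List.foldl_append_singleton_eq_map]

-- both sides' per-plane maps coincide with (map dP) of the label Nat-indices
theorem maps_eq (details : List String) (L : List (Int × String))
    (hnn : ∀ p ∈ L, 0 ≤ p.1) :
    (PySem.List.enumerate (L.map (·.1))).map (fun pi =>
        if PySem.Str.lower (PySem.List.pyGetD details (pi.2 + 1) "") == "atoms" then
          [("DEF_TYPE", "ATOMS"), ("ATOMS",
            PySem.List.pyGetD ((L.map (·.1)).map (fun l => scanA details (l + 2).toNat "")) pi.1 "")]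
        else
          [("DEF_TYPE", "VECTOR"), ("NORMAL_VECTOR",
            PySem.List.pyGetD ((L.map (·.1)).map (fun l => scanA details (l + 2).toNat "")) pi.1 "")])
      = L.map (fun p =>
        if PySem.Str.lower (PySem.List.pyGetD details (p.1 + 1) "") == "atoms" then
          [("DEF_TYPE", "ATOMS"), ("ATOMS", PySem.List.pyGetD (runsOf details) (p.1 + 2) "")]
        else
          [("DEF_TYPE", "VECTOR"), ("NORMAL_VECTOR", PySem.List.pyGetD (runsOf details) (p.1 + 2) "")]) := by
  apply List.ext_getElem
  · simp
  · intro k h1 h2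
    have hkL : k < L.length := by simpa using h2
    have hnnk : 0 ≤ L[k].1 := hnn L[k] (List.getElem_mem _)
    simp only [List.getElem_map, PySem.List.getElem_enumerate, List.getElem_map]
    have hcast : L[k].1 + 2 = ((L[k].1.toNat + 2 : Nat) : Int) := by omega
    have hids : PySem.List.pyGetD ((L.map (·.1)).map (fun l => scanA details (l + 2).toNat ""))
        ((k : Nat) : Int) "" = idsOf details (L[k].1.toNat + 2) := by
      rw [PySem.List.pyGetD_natCast, List.getD_eq_getElem _ _ (by simpa using hkL),
        List.getElem_map, List.getElem_map, scanA_eq]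
      have : (L[k].1 + 2).toNat = L[k].1.toNat + 2 := by omega
      simp [this]
    have hrun : PySem.List.pyGetD (runsOf details) (L[k].1 + 2) ""
        = idsOf details (L[k].1.toNat + 2) := by
      rw [hcast, PySem.List.pyGetD_natCast, runsOf_getD]
    simp only [zero_add] at *
    rw [hids, hrun]

theorem main_eq (details : List String) : get_planes details = get_planes_alt details := by
  simp only [get_planes, get_planes_alt, get_ids, foldlA_eq, List.nil_append]
  congr 1
  congr 1
  apply maps_eq
  intro p hp
  have hmemE : p ∈ PySem.List.enumerate details := List.mem_of_mem_filter hp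
  obtain ⟨k', _, hk'⟩ := (PySem.List.mem_enumerate_iff details 0 p).mp hmemE
  rw [hk']; simp

-- ===== VERDICT (by name: the statement is the Claim_ definition above) =====
theorem get_planes_spec : Claim_equal_get_planes := by
  intro details _hdom _hpre
  unfold Spec_get_planes
  exact main_eq details

theorem get_planes_raises : Claim_raises_get_planes := by
  unfold Claim_raises_get_planes
  constructor
  · intro details _hdom hr hpre
    obtain ⟨⟨i, hi, hplane, hall⟩, _⟩ := hr
    obtain ⟨j, hj, hij, hnum⟩ := hpre i hi hplane
    rw [hall j hj hij] at hnum
    exact absurd hnum (by simp)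
  · refine ⟨by decide, by decide, by decide⟩

-- self-check: B's port really returns the stated literal at the raise witness
theorem pvRaiseWitness_ok :
    get_planes_alt pvRaiseWitness_get_planes = pvRaiseWitnessOut_get_planes :=
  get_planes_raises.2.2.2
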